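-- pv_equiv track=rewrite | github.com/Jordan231111/CodeForce-Solutions | Permutation_Counting_Hard.py | build_poly_pair_general
-- ===== SOURCE A (Python) =====
-- MOD = 998244353
--
-- def build_poly_pair_general(a: int, b: int, inv: list[int]) -> list[int]:
--     # F(t) = sum_{t=0..min(a,b)} 2^t * C(a,t) * C(b,t) * t!
--     #      = sum 2^t * P(a,t) * P(b,t) / t!
--     m = a if a < b else b
--     f = [0] * (m + 1)
--     f[0] = 1
--     cur = 1
--     for t in range(1, m + 1):
--         cur = cur * 2 % MOD
--         cur = cur * (a - (t - 1)) % MOD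
--         cur = cur * (b - (t - 1)) % MOD
--         cur = cur * inv[t] % MOD
--         f[t] = cur
--     return f
-- ===== SOURCE B (Python) =====
-- MOD = 998244353
--
-- def _table(m, mul):
--     # prefix running-product table reduced mod MOD: tab[0]=1, tab[t]=tab[t-1]*mul(t)%MOD
--     tab = [1]
--     for t in range(1, m + 1):
--         tab.append(tab[-1] * mul(t) % MOD)
--     return tab
--
-- def build_poly_pair_general(a: int, b: int, inv: list[int]) -> list[int]:
--     m = a if a < b else b
--     pow2 = _table(m, lambda t: 2)
--     pa = _table(m, lambda t: a - t + 1)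
--     pb = _table(m, lambda t: b - t + 1)
--     pinv = _table(m, lambda t: inv[t])
--     return [pow2[t] * pa[t] % MOD * pb[t] % MOD * pinv[t] % MOD for t in range(m + 1)]
-- ===== Notes on version B (the rewrite author's own statement) =====
-- stated objective: alternative
-- what changed: B replaces A's single fused running product (cur updated with 2, a-t+1, b-t+1 and inv[t] in one loop) by four independently built running-product tables (powers of two, falling factorials of a and of b, prefix products of inv), each built by its own pass of a shared _table helper, combined in a separate final pass.
import Mathlib
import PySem

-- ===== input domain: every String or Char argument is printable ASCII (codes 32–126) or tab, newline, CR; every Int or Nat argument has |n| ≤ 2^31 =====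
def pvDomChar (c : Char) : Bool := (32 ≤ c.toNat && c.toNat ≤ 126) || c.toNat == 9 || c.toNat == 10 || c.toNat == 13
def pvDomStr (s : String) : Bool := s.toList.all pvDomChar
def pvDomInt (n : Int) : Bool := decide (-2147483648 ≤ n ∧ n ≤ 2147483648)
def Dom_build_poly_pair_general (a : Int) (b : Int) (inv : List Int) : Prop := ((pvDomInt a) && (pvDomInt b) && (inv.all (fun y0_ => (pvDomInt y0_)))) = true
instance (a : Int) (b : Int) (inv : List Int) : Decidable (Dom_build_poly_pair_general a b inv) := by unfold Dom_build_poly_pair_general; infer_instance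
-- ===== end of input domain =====

-- B replaces A's single fused running product by four independently built running-product
-- tables combined in a final pass (objective: alternative decomposition, same cost).

def pyMOD : Int := 998244353

-- ===== PORT A =====
-- the body of A's for-loop, on state (f, cur)
def pvStepA (a : Int) (b : Int) (inv : List Int) (st : List Int × Int) (t : Int) : List Int × Int :=
  let cur := PySem.Int.mod (st.2 * 2) pyMOD
  let cur := PySem.Int.mod (cur * (a - (t - 1))) pyMOD
  let cur := PySem.Int.mod (cur * (b - (t - 1))) pyMOD
  let cur := PySem.Int.mod (cur * PySem.List.pyGetD inv t 0) pyMOD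
  (PySem.List.pySetD st.1 t cur, cur)

def build_poly_pair_general (a : Int) (b : Int) (inv : List Int) : List Int :=
  let m := if a < b then a else b
  let f := PySem.List.pyRepeat [0] (m + 1)     -- [0] * (m + 1)
  let f := PySem.List.pySetD f 0 1             -- f[0] = 1 (raises outside Pre_)
  let st := (PySem.List.pyRange 1 (m + 1) 1).foldl (pvStepA a b inv) (f, 1)
  st.1

-- ===== PORT B =====
-- _table(m, mul): tab = [1]; for t in range(1, m+1): tab.append(tab[-1] * mul(t) % MOD)
def pvTable (m : Int) (mul : Int → Int) : List Int :=
  (PySem.List.pyRange 1 (m + 1) 1).foldl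
    (fun tab t => tab ++ [PySem.Int.mod (PySem.List.pyGetD tab (-1) 0 * mul t) pyMOD]) [1]

def build_poly_pair_general_alt (a : Int) (b : Int) (inv : List Int) : List Int :=
  let m := if a < b then a else b
  let pow2 := pvTable m (fun _ => 2)
  let pa := pvTable m (fun t => a - t + 1)
  let pb := pvTable m (fun t => b - t + 1)
  let pinv := pvTable m (fun t => PySem.List.pyGetD inv t 0)
  (PySem.List.pyRange 0 (m + 1) 1).map (fun t =>
    PySem.Int.mod (PySem.Int.mod (PySem.Int.mod
      (PySem.List.pyGetD pow2 t 0 * PySem.List.pyGetD pa t 0) pyMOD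
        * PySem.List.pyGetD pb t 0) pyMOD
        * PySem.List.pyGetD pinv t 0) pyMOD)

-- ===== PRECONDITION & SPEC =====
-- Pre_ is exactly A's return domain: A raises IndexError when min(a,b) < 0 (f[0] = 1 on an
-- empty list) and when 1 ≤ min(a,b) and len(inv) ≤ min(a,b) (reading inv[t]).
def Pre_build_poly_pair_general (a : Int) (b : Int) (inv : List Int) : Prop :=
  0 ≤ min a b ∧ (min a b = 0 ∨ min a b < (inv.length : Int))
instance (a : Int) (b : Int) (inv : List Int) : Decidable (Pre_build_poly_pair_general a b inv) := by
  unfold Pre_build_poly_pair_general; infer_instance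
def pvWitness_build_poly_pair_general : Int × Int × List Int := (2, 3, [0, 5, 7])

def Spec_build_poly_pair_general (a : Int) (b : Int) (inv : List Int) (out : List Int) : Prop := out = build_poly_pair_general_alt a b inv
instance (a : Int) (b : Int) (inv : List Int) (out : List Int) : Decidable (Spec_build_poly_pair_general a b inv out) := by unfold Spec_build_poly_pair_general; infer_instance

-- ===== CLAIM (what is proved, stated in full; the proofs are below) =====
def Claim_equal_build_poly_pair_general : Prop := ∀ (a : Int) (b : Int) (inv : List Int), Dom_build_poly_pair_general a b inv → Pre_build_poly_pair_general a b inv → Spec_build_poly_pair_general a b inv (build_poly_pair_general a b inv)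

-- ===== LEMMAS AND PROOFS =====

-- reference sequences ------------------------------------------------------
-- reduced running product: T g 0 = 1, T g (k+1) = T g k * g (k+1) % M
def pvT (g : Nat → Int) : Nat → Int
  | 0 => 1
  | k + 1 => pvT g k * g (k + 1) % pyMOD

-- unreduced running product
def pvP (g : Nat → Int) : Nat → Int
  | 0 => 1
  | k + 1 => pvP g k * g (k + 1)

-- A's fused cur sequence (with %)
def pvC (a : Int) (b : Int) (inv : List Int) : Nat → Int
  | 0 => 1
  | k + 1 =>
    pvC a b inv k * 2 % pyMOD * (a - (k : Int)) % pyMOD * (b - (k : Int)) % pyMOD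
      * PySem.List.pyGetD inv ((k : Int) + 1) 0 % pyMOD

theorem pyMOD_pos : (0 : Int) < pyMOD := by unfold pyMOD; norm_num

theorem pv_mod_eq (x : Int) : PySem.Int.mod x pyMOD = x % pyMOD :=
  PySem.Int.mod_eq_emod_of_pos pyMOD_pos

theorem pv_one_mod : (1 : Int) = 1 % pyMOD := by unfold pyMOD; decide

theorem pv_mml (x y M : Int) : x % M * y % M = x * y % M := by
  conv_rhs => rw [Int.mul_emod]
  rw [Int.mul_emod, Int.emod_emod_of_dvd _ dvd_rfl]

theorem pvT_eq (g : Nat → Int) (k : Nat) : pvT g k = pvP g k % pyMOD := by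
  induction k with
  | zero => exact pv_one_mod
  | succ k ih => rw [pvT, pvP, ih, pv_mml]

-- the combined per-coefficient product
def pvG (a : Int) (b : Int) (inv : List Int) (t : Nat) : Int :=
  2 * (a - (t : Int) + 1) * (b - (t : Int) + 1) * PySem.List.pyGetD inv (t : Int) 0

theorem pv_fuse (M P x y z w : Int) :
    P % M * x % M * y % M * z % M * w % M = P * x * y * z * w % M := by
  rw [pv_mml P x M, pv_mml (P * x) y M, pv_mml (P * x * y) z M,
    pv_mml (P * x * y * z) w M]

theorem pv_comb (M p q r s : Int) :
    p % M * (q % M) % M * (r % M) % M * (s % M) % M = p * q * r * s % M := by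
  rw [← Int.mul_emod p q M, pv_mml (p * q) (r % M) M,
    show p * q * (r % M) % M = r % M * (p * q) % M by ring_nf,
    pv_mml r (p * q) M, pv_mml (r * (p * q)) (s % M) M,
    show r * (p * q) * (s % M) % M = s % M * (r * (p * q)) % M by ring_nf,
    pv_mml s (r * (p * q)) M]
  ring_nf

theorem pvC_eq (a b : Int) (inv : List Int) (k : Nat) :
    pvC a b inv k = pvP (pvG a b inv) k % pyMOD := by
  induction k with
  | zero => exact pv_one_mod
  | succ k ih =>
    rw [pvC, pvP, ih,
      pv_fuse pyMOD (pvP (pvG a b inv) k) 2 (a - (k : Int)) (b - (k : Int))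
        (PySem.List.pyGetD inv ((k : Int) + 1) 0)]
    congr 1
    unfold pvG
    push_cast
    ring

theorem pvP_split (a b : Int) (inv : List Int) (k : Nat) :
    pvP (pvG a b inv) k =
      pvP (fun _ => 2) k * pvP (fun t => a - (t : Int) + 1) k
        * pvP (fun t => b - (t : Int) + 1) k
        * pvP (fun t => PySem.List.pyGetD inv (t : Int) 0) k := by
  induction k with
  | zero => simp [pvP]
  | succ k ih => simp only [pvP, ih, pvG]; ring

-- elementwise agreement of A's fused value with B's combined tables
theorem pv_elem (a b : Int) (inv : List Int) (k : Nat) :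
    pvC a b inv k =
      pvT (fun _ => 2) k * pvT (fun t => a - (t : Int) + 1) k % pyMOD
        * pvT (fun t => b - (t : Int) + 1) k % pyMOD
        * pvT (fun t => PySem.List.pyGetD inv (t : Int) 0) k % pyMOD := by
  rw [pvC_eq, pvP_split, pvT_eq, pvT_eq, pvT_eq, pvT_eq, pv_comb]

-- ---------------------------------------------------------------- B side --
theorem pvTable_eq (mul : Int → Int) (n : Nat) :
    pvTable (n : Int) mul =
      (List.range (n + 1)).map (fun k => pvT (fun i => mul (i : Int)) k) := by
  induction n with
  | zero =>
    unfold pvTable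
    rw [show ((0 : Nat) : Int) + 1 = 1 by norm_num,
      PySem.List.pyRange_one_eq_nil (le_refl 1)]
    simp [pvT]
  | succ n ih =>
    unfold pvTable
    rw [show ((n + 1 : Nat) : Int) + 1 = ((n : Int) + 1) + 1 by push_cast; ring,
      PySem.List.pyRange_one_succ_right (by omega), List.foldl_append,
      List.foldl_cons, List.foldl_nil]
    unfold pvTable at ih
    rw [ih]
    have hlast : PySem.List.pyGetD
        (List.map (fun k => pvT (fun i => mul (i : Int)) k) (List.range (n + 1))) (-1) 0
        = pvT (fun i => mul (i : Int)) n := by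
      rw [List.range_succ, List.map_append, List.map_singleton,
        PySem.List.pyGetD_neg_one_append_singleton]
    rw [hlast, pv_mod_eq,
      show List.range (n + 1 + 1) = List.range (n + 1) ++ [n + 1] from List.range_succ,
      List.map_append, List.map_singleton]
    have he : pvT (fun i => mul (i : Int)) n * mul ((n : Int) + 1) % pyMOD
        = pvT (fun i => mul (i : Int)) (n + 1) := by
      rw [pvT]; norm_cast
    rw [he]

-- ---------------------------------------------------------------- A side --
def pvFA (a : Int) (b : Int) (inv : List Int) (n : Nat) (j : Nat) : List Int :=
  (List.range (n + 1)).map (fun i => if i ≤ j then pvC a b inv i else 0)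

theorem pvFA_set (a b : Int) (inv : List Int) (n j : Nat) (_hj : j + 1 ≤ n) :
    (pvFA a b inv n j).set (j + 1) (pvC a b inv (j + 1)) = pvFA a b inv n (j + 1) := by
  apply List.ext_getElem
  · simp [pvFA]
  · intro i h1 h2
    simp only [pvFA, List.getElem_set, List.getElem_map, List.getElem_range]
    by_cases hi : i = j + 1
    · subst hi; simp
    · have h' : ¬ (j + 1 = i) := fun h => hi h.symm
      simp only [h', if_false]
      have he : (i ≤ j) = (i ≤ j + 1) := propext ⟨fun h => by omega, fun h => by omega⟩
      split_ifs <;> first | rfl | omega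

theorem pv_foldA (a b : Int) (inv : List Int) (n : Nat) (j : Nat) (hj : j ≤ n) :
    (PySem.List.pyRange 1 ((j : Int) + 1) 1).foldl (pvStepA a b inv)
        (pvFA a b inv n 0, 1) = (pvFA a b inv n j, pvC a b inv j) := by
  induction j with
  | zero =>
    rw [PySem.List.pyRange_one_eq_nil (by omega)]
    simp [pvC]
  | succ j ih =>
    rw [show ((j + 1 : Nat) : Int) + 1 = ((j : Int) + 1) + 1 by push_cast; ring,
      PySem.List.pyRange_one_succ_right (by omega), List.foldl_append,
      ih (by omega), List.foldl_cons, List.foldl_nil]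
    unfold pvStepA
    simp only [pv_mod_eq]
    have hcur :
        pvC a b inv j * 2 % pyMOD * (a - ((j : Int) + 1 - 1)) % pyMOD
          * (b - ((j : Int) + 1 - 1)) % pyMOD
          * PySem.List.pyGetD inv ((j : Int) + 1) 0 % pyMOD = pvC a b inv (j + 1) := by
      rw [pvC]
      norm_num
    rw [hcur]
    rw [show ((j : Int) + 1) = ((j + 1 : Nat) : Int) by push_cast; ring,
      PySem.List.pySetD_natCast]
    rw [pvFA_set a b inv n j (by omega)]

theorem pv_portA (a b : Int) (inv : List Int) (n : Nat)
    (hm : (if a < b then a else b) = (n : Int)) :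
    build_poly_pair_general a b inv = (List.range (n + 1)).map (pvC a b inv) := by
  unfold build_poly_pair_general
  rw [hm]
  have hinit : PySem.List.pySetD (PySem.List.pyRepeat [0] ((n : Int) + 1)) 0 1
      = pvFA a b inv n 0 := by
    rw [PySem.List.pyRepeat_singleton,
      show (0 : Int) = ((0 : Nat) : Int) by norm_num, PySem.List.pySetD_natCast]
    apply List.ext_getElem
    · simp [pvFA]
    · intro i h1 h2
      simp only [List.getElem_set, List.getElem_replicate, pvFA, List.getElem_map,
        List.getElem_range]
      by_cases hi : i = 0
      · simp [hi, pvC]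
      · simp [hi]; omega
  simp only [hinit]
  rw [pv_foldA a b inv n n (le_refl n)]
  apply List.ext_getElem
  · simp [pvFA]
  · intro i h1 h2
    simp only [pvFA, List.getElem_map, List.getElem_range]
    simp only [pvFA, List.length_map, List.length_range] at h1
    simp [show i ≤ n by omega]

theorem pv_portB (a b : Int) (inv : List Int) (n : Nat)
    (hm : (if a < b then a else b) = (n : Int)) :
    build_poly_pair_general_alt a b inv =
      (List.range (n + 1)).map (fun k =>
        pvT (fun _ => 2) k * pvT (fun t => a - (t : Int) + 1) k % pyMOD
          * pvT (fun t => b - (t : Int) + 1) k % pyMOD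
          * pvT (fun t => PySem.List.pyGetD inv (t : Int) 0) k % pyMOD) := by
  unfold build_poly_pair_general_alt
  rw [hm]
  have hget : ∀ (g : Nat → Int) (i : Nat), i < n + 1 →
      PySem.List.pyGetD ((List.range (n + 1)).map (fun k => pvT g k)) ((0 : Int) + (i : Int)) 0
        = pvT g i := by
    intro g i hi
    rw [zero_add, PySem.List.pyGetD_natCast]
    simp [List.getD_eq_getElem?_getD, hi]
  simp only [pvTable_eq, PySem.List.pyRange_one]
  rw [show ((n : Int) + 1 - 0).toNat = n + 1 by omega, List.map_map]
  apply List.ext_getElem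
  · simp
  · intro i h1 h2
    have hi : i < n + 1 := by simpa using h2
    simp only [List.getElem_map, List.getElem_range, Function.comp_apply]
    rw [pv_mod_eq, pv_mod_eq, pv_mod_eq, hget _ i hi, hget _ i hi, hget _ i hi, hget _ i hi]

-- ===== VERDICT (by name: the statement is the Claim_ definition above) =====
theorem build_poly_pair_general_spec : Claim_equal_build_poly_pair_general := by
  intro a b inv _ hpre
  unfold Spec_build_poly_pair_general
  obtain ⟨h0, _⟩ := hpre
  have h0' : 0 ≤ (if a < b then a else b) := by
    split_ifs with hab
    · rw [min_def, if_pos (le_of_lt hab)] at h0; exact h0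
    · rw [min_def] at h0; split_ifs at h0 <;> omega
  have hm : (if a < b then a else b) = ((if a < b then a else b).toNat : Int) :=
    (Int.toNat_of_nonneg h0').symm
  rw [pv_portA a b inv _ hm, pv_portB a b inv _ hm]
  apply List.map_congr_left
  intro k _
  exact pv_elem a b inv k
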